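-- pv_equiv track=rewrite | github.com/HyerinPark1998/algorithm_study | 2023/day27.py | solution
-- ===== SOURCE A (Python) =====
-- def solution(s):
--     cnt = 0
--     for i in range(len(s)):
--         cnt_x = 0
--         cnt_y = 0
--         for i in range(len(s)):
--             x = s[0]
--             if x == s[i]:
--                 cnt_x += 1
--             else:
--                 cnt_y += 1
--             if cnt_x == cnt_y:
--                 cnt += 1
--                 s = s[i+1:]
--                 break
--         if cnt_x != cnt_y:
--             cnt += 1
--             break
--     return cnt
-- ===== SOURCE B (Python) =====
-- def solution(s):
--     cnt = 0
--     first = None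
--     bal = 0
--     for c in s:
--         if first is None:
--             first = c
--             bal = 0
--         bal += 1 if c == first else -1
--         if bal == 0:
--             cnt += 1
--             first = None
--     if first is not None:
--         cnt += 1
--     return cnt
-- ===== Notes on version B (the rewrite author's own statement) =====
-- stated objective: faster
-- what changed: Replaced A's rescan-and-slice nested loops (re-scanning and re-slicing the remaining string for every group) with a single linear pass keeping a running balance counter (#first-char minus #others) and closing a group whenever it hits zero.
import Mathlib
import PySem

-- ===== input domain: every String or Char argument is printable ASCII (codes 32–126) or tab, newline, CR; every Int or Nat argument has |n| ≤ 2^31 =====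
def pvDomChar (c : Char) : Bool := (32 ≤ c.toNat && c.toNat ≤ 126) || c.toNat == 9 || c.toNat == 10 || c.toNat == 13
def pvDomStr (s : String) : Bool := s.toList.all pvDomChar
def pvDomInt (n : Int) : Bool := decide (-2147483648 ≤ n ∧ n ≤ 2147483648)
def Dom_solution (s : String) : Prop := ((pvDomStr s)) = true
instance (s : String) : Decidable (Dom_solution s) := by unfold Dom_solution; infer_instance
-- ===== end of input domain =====

-- B replaces A's quadratic slice-and-rescan grouping with one linear pass keeping a running balance; return value only, no side effects.

-- ===== PORT A =====
-- inner loop of A: scan cs comparing with x, counting cnt_x/cnt_y; on cnt_x == cnt_y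
-- break, reporting the number of characters consumed (Python's i+1) as `some k`.
def pvInnerA (x : Char) (cs : List Char) (cx cy : Int) : Int × Int × Option Nat :=
  match cs with
  | [] => (cx, cy, none)
  | c :: rest =>
    let cx' := if x == c then cx + 1 else cx
    let cy' := if x == c then cy else cy + 1
    if cx' == cy' then (cx', cy', some 1)
    else
      match pvInnerA x rest cx' cy' with
      | (a, b, none) => (a, b, none)
      | (a, b, some k) => (a, b, some (k + 1))

-- outer loop of A: fuel = range(len(s)) evaluated once on the original string.
def pvOuterA : Nat → Int → List Char → Int
  | 0, cnt, _ => cnt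
  | n + 1, cnt, s =>
    match s with
    | [] => pvOuterA n cnt []          -- inner loop runs zero times, cnt_x = cnt_y = 0
    | x :: _ =>
      match pvInnerA x s 0 0 with
      | (_, _, some k) => pvOuterA n (cnt + 1) (s.drop k)   -- break with cnt_x == cnt_y
      | (cx, cy, none) => if cx ≠ cy then cnt + 1 else pvOuterA n cnt s

def solution (s : String) : Int := pvOuterA s.toList.length 0 s.toList

-- ===== PORT B =====
-- single pass: first = current group's first char (none between groups), bal = #first − #other.
def pvLoopB : List Char → Int → Option Char → Int → Int
  | [], cnt, first, _ => if first.isSome then cnt + 1 else cnt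
  | c :: rest, cnt, first, bal =>
    match first with
    | none =>
      let bal' := (0 : Int) + 1            -- first := c; bal := 0; bal += 1 (c == first)
      if bal' == 0 then pvLoopB rest (cnt + 1) none bal'
      else pvLoopB rest cnt (some c) bal'
    | some f =>
      let bal' := bal + (if c == f then 1 else -1)
      if bal' == 0 then pvLoopB rest (cnt + 1) none bal'
      else pvLoopB rest cnt (some f) bal'

def solution_alt (s : String) : Int := pvLoopB s.toList 0 none 0

-- ===== PRECONDITION & SPEC =====
def Spec_solution (s : String) (out : Int) : Prop := out = solution_alt s
instance (s : String) (out : Int) : Decidable (Spec_solution s out) := by unfold Spec_solution; infer_instance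

-- ===== CLAIM (what is proved, stated in full; the proofs are below) =====
def Claim_equal_solution : Prop := ∀ (s : String), Dom_solution s → Spec_solution s (solution s)

-- ===== LEMMAS AND PROOFS =====

theorem pvInnerA_none_ne (x : Char) :
    ∀ (cs : List Char) (cx cy a b : Int), cs ≠ [] →
    pvInnerA x cs cx cy = (a, b, none) → a ≠ b := by
  intro cs
  induction cs with
  | nil => intro _ _ _ _ h; exact absurd rfl h
  | cons c rest ih =>
    intro cx cy a b _ h
    simp only [pvInnerA] at h
    set cx' := if x == c then cx + 1 else cx with hcx'
    set cy' := if x == c then cy else cy + 1 with hcy'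
    by_cases hb : (cx' == cy') = true
    · rw [if_pos hb] at h; simp at h
    · rw [if_neg hb] at h
      cases rest with
      | nil =>
        simp only [pvInnerA, Prod.mk.injEq] at h
        obtain ⟨h1, h2, _⟩ := h
        subst h1; subst h2
        simpa using hb
      | cons d ds =>
        revert h
        cases hrec : pvInnerA x (d :: ds) cx' cy' with
        | mk a' p =>
          cases p with
          | mk b' o =>
            cases o with
            | none =>
              intro h
              simp only [Prod.mk.injEq] at h
              obtain ⟨h1, h2, _⟩ := h
              subst h1; subst h2
              exact ih _ _ _ _ (by simp) hrec
            | some k => intro h; simp at h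

theorem pvInnerA_some_pos (x : Char) :
    ∀ (cs : List Char) (cx cy a b : Int) (k : Nat),
    pvInnerA x cs cx cy = (a, b, some k) → 1 ≤ k := by
  intro cs
  induction cs with
  | nil => intro _ _ _ _ _ h; simp [pvInnerA] at h
  | cons c rest ih =>
    intro cx cy a b k h
    simp only [pvInnerA] at h
    set cx' := if x == c then cx + 1 else cx with hcx'
    set cy' := if x == c then cy else cy + 1 with hcy'
    by_cases hb : (cx' == cy') = true
    · rw [if_pos hb] at h
      simp only [Prod.mk.injEq, Option.some.injEq] at h
      omega
    · rw [if_neg hb] at h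
      revert h
      cases hrec : pvInnerA x rest cx' cy' with
      | mk a' p =>
        cases p with
        | mk b' o =>
          cases o with
          | none => intro h; simp at h
          | some k' =>
            intro h
            simp only [Prod.mk.injEq, Option.some.injEq] at h
            omega

-- inner correspondence: B's loop with first = some x and bal = cx − cy follows A's inner scan.
theorem pvLoopB_inner (x : Char) :
    ∀ (cs : List Char) (cnt cx cy : Int),
    pvLoopB cs cnt (some x) (cx - cy) =
      (match pvInnerA x cs cx cy with
       | (_, _, some k) => pvLoopB (cs.drop k) (cnt + 1) none 0
       | (_, _, none) => cnt + 1) := by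
  intro cs
  induction cs with
  | nil => intro cnt cx cy; simp [pvLoopB, pvInnerA]
  | cons c rest ih =>
    intro cnt cx cy
    simp only [pvLoopB, pvInnerA]
    set cx' := if x == c then cx + 1 else cx with hcx'
    set cy' := if x == c then cy else cy + 1 with hcy'
    have hbal : cx - cy + (if c == x then (1:Int) else -1) = cx' - cy' := by
      rw [hcx', hcy']
      by_cases hx : x = c
      · subst hx; simp; omega
      · have h1 : (x == c) = false := by simpa using hx
        have h2 : (c == x) = false := by simpa using Ne.symm hx
        simp [h1, h2]; omega
    rw [hbal]
    by_cases heq : (cx' == cy') = true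
    · have hz : (cx' - cy' == 0) = true := by
        simp only [beq_iff_eq] at heq ⊢; omega
      have h0 : cx' - cy' = 0 := by
        simp only [beq_iff_eq] at heq; omega
      rw [if_pos heq, hz, h0]
      simp [List.drop]
    · have hz : (cx' - cy' == 0) = false := by
        simp only [beq_iff_eq] at heq
        simp only [beq_eq_false_iff_ne, ne_eq]
        omega
      rw [if_neg heq, hz]
      simp only [Bool.false_eq_true, if_false]
      rw [ih cnt cx' cy']
      cases hrec : pvInnerA x rest cx' cy' with
      | mk a' p =>
        cases p with
        | mk b' o =>
          cases o with
          | none => simp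
          | some k => simp [List.drop]

-- one whole group: B on a nonempty list matches A's inner scan from (0, 0).
theorem pvLoopB_group (x : Char) (rest : List Char) (cnt : Int) :
    pvLoopB (x :: rest) cnt none 0 =
      (match pvInnerA x (x :: rest) 0 0 with
       | (_, _, some k) => pvLoopB ((x :: rest).drop k) (cnt + 1) none 0
       | (_, _, none) => cnt + 1) := by
  have hstep : pvLoopB (x :: rest) cnt none 0 = pvLoopB rest cnt (some x) ((1:Int) - 0) := by
    norm_num [pvLoopB]
  rw [hstep, pvLoopB_inner x rest cnt 1 0]
  simp only [pvInnerA, beq_self_eq_true, if_pos]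
  cases hrec : pvInnerA x rest 1 0 with
  | mk a' p =>
    cases p with
    | mk b' o =>
      cases o with
      | none => simp [hrec]
      | some k => simp [hrec, List.drop]

theorem pvOuterA_nil : ∀ (n : Nat) (cnt : Int), pvOuterA n cnt [] = cnt := by
  intro n
  induction n with
  | zero => intro cnt; rfl
  | succ m ih => intro cnt; simpa [pvOuterA] using ih cnt

theorem pvOuterA_eq_loopB :
    ∀ (n : Nat) (s : List Char) (cnt : Int), s.length ≤ n →
    pvOuterA n cnt s = pvLoopB s cnt none 0 := by
  intro n
  induction n with
  | zero =>
    intro s cnt hlen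
    have : s = [] := List.eq_nil_of_length_eq_zero (Nat.le_zero.mp hlen)
    subst this
    simp [pvOuterA, pvLoopB]
  | succ m ih =>
    intro s cnt hlen
    cases s with
    | nil => simp [pvOuterA, pvOuterA_nil, pvLoopB]
    | cons x rest =>
      rw [pvLoopB_group]
      simp only [pvOuterA]
      cases hrec : pvInnerA x (x :: rest) 0 0 with
      | mk a' p =>
        cases p with
        | mk b' o =>
          cases o with
          | none =>
            have hne : a' ≠ b' := pvInnerA_none_ne x (x :: rest) 0 0 a' b' (by simp) hrec
            simp [hne]
          | some k =>
            have hk : 1 ≤ k := pvInnerA_some_pos x (x :: rest) 0 0 a' b' k hrec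
            simp only []
            apply ih
            rw [List.length_drop]
            simp only [List.length_cons] at hlen ⊢
            omega

-- ===== VERDICT (by name: the statement is the Claim_ definition above) =====
theorem solution_spec : Claim_equal_solution := by
  intro s _
  unfold Spec_solution solution solution_alt
  exact pvOuterA_eq_loopB s.toList.length s.toList 0 le_rfl
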